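-- pv_equiv track=rewrite | github.com/Haris-Asif/aljazeera | main.py | _split_blocks_for_limits
-- ===== SOURCE A (Python) =====
-- def _url_encode_for_whatsapp(text: str) -> str:
--     """Encode minimally for wa.me URL (matching your existing approach)."""
--     # Keep same encoding style you used, so links behave consistently
--     return text.replace(" ", "%20").replace("\n", "%0A")
--
-- def _split_blocks_for_limits(blocks, plain_limit=3000, encoded_limit=1800):
--     """
--     Given a list of text blocks, accumulate them into chunks that
--     satisfy both plain text and encoded URL length limits.
--     """
--     chunks = []
--     current = ""
--
--     for block in blocks:
--         candidate = current + block
--         # Check both plain and encoded limits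
--         if len(candidate) > plain_limit or len(_url_encode_for_whatsapp(candidate)) > encoded_limit:
--             if current:
--                 chunks.append(current.rstrip())
--                 current = ""
--
--             # If single block is still too large, split by lines
--             if len(block) > plain_limit or len(_url_encode_for_whatsapp(block)) > encoded_limit:
--                 lines = block.splitlines(keepends=True)
--                 small = ""
--                 for ln in lines:
--                     cand2 = small + ln
--                     if len(cand2) > plain_limit or len(_url_encode_for_whatsapp(cand2)) > encoded_limit:
--                         if small:
--                             chunks.append(small.rstrip())
--                             small = ""
--                         # handle very long single line (rare): hard split
--                         if len(ln) > plain_limit or len(_url_encode_for_whatsapp(ln)) > encoded_limit: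
--                             # split the line at safe slice points
--                             seg = ln
--                             while seg:
--                                 # pick a safe slice size
--                                 step = min(1000, len(seg))
--                                 piece = seg[:step]
--                                 while len(_url_encode_for_whatsapp(piece)) > encoded_limit and step > 10:
--                                     step -= 10
--                                     piece = seg[:step]
--                                 chunks.append(piece.rstrip())
--                                 seg = seg[step:]
--                         else:
--                             small = ln
--                     else:
--                         small = cand2
--                 if small:
--                     chunks.append(small.rstrip())
--             else:
--                 current = block
--         else:
--             current = candidate
--
--     if current:
--         chunks.append(current.rstrip())
--
--     return chunks
-- ===== SOURCE B (Python) =====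
-- def _url_encode_for_whatsapp(text: str) -> str:
--     """Encode minimally for wa.me URL (matching your existing approach)."""
--     return text.replace(" ", "%20").replace("\n", "%0A")
--
-- def _split_blocks_for_limits(blocks, plain_limit=3000, encoded_limit=1800):
--     """Same chunking, but no candidate string is ever built or re-encoded:
--     each item is measured once (length, encoded length = length + 2*(spaces+newlines)),
--     the running chunk is kept as integer totals plus a list of parts joined only at
--     flush time, and the hard split uses a prefix-sum array of per-char encoded costs."""
--     out = []
--
--     def measure(s):
--         return len(s), len(s) + 2 * (s.count(" ") + s.count("\n"))
--
--     def fits(n, en):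
--         return n <= plain_limit and en <= encoded_limit
--
--     def emit(parts, n):
--         if n:
--             out.append("".join(parts).rstrip())
--
--     def hard_split(ln):
--         pre = [0]
--         for ch in ln:
--             pre.append(pre[-1] + (3 if ch == " " or ch == "\n" else 1))
--         i, total = 0, len(ln)
--         while i < total:
--             step = min(1000, total - i)
--             while pre[i + step] - pre[i] > encoded_limit and step > 10:
--                 step -= 10
--             out.append(ln[i:i + step].rstrip())
--             i += step
--
--     def pack_lines(block):
--         parts, n, en = [], 0, 0
--         for ln in block.splitlines(keepends=True):
--             ln_n, ln_en = measure(ln)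
--             if not fits(n + ln_n, en + ln_en):
--                 emit(parts, n)
--                 parts, n, en = [], 0, 0
--                 if not fits(ln_n, ln_en):
--                     hard_split(ln)
--                 else:
--                     parts, n, en = [ln], ln_n, ln_en
--             else:
--                 parts.append(ln)
--                 n, en = n + ln_n, en + ln_en
--         emit(parts, n)
--
--     parts, n, en = [], 0, 0
--     for block in blocks:
--         b_n, b_en = measure(block)
--         if not fits(n + b_n, en + b_en):
--             emit(parts, n)
--             parts, n, en = [], 0, 0
--             if not fits(b_n, b_en):
--                 pack_lines(block)
--             else:
--                 parts, n, en = [block], b_n, b_en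
--         else:
--             parts.append(block)
--             n, en = n + b_n, en + b_en
--     emit(parts, n)
--     return out
-- ===== Notes on version B (the rewrite author's own statement) =====
-- stated objective: faster
-- what changed: Instead of concatenating a candidate string and re-encoding it with _url_encode_for_whatsapp at every step, B measures each item once (encoded length computed arithmetically as len + 2*(spaces+newlines)), keeps the running chunk as integer totals plus a list of parts joined only at flush, and hard-splits long lines with a prefix-sum array of per-char encoded costs.
import Mathlib
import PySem

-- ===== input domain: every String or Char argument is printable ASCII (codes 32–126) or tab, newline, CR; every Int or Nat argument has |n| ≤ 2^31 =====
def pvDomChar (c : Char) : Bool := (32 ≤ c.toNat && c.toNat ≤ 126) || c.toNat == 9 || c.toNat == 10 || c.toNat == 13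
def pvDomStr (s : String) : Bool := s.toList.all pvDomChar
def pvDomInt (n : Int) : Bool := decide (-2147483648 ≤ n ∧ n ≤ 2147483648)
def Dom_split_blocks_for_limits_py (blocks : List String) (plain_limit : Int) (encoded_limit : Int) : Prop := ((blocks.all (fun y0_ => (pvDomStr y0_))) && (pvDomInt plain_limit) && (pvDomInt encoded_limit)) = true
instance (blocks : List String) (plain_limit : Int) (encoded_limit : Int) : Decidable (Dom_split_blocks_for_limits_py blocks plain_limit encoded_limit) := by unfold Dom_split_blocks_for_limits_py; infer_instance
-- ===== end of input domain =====

-- B produces the same chunks without ever building or re-encoding a candidate string: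
-- items are measured once (length and encoded length computed arithmetically), the running
-- chunk is integer totals plus a parts list joined only at flush, and the hard split works
-- on a prefix-sum array of per-char encoded costs (measured faster at the large sizes).

-- ===== SHARED HELPERS (code both Python sources contain verbatim) =====

-- _url_encode_for_whatsapp (same-module helper called by A; B only measures with it conceptually)
def urlEncode (s : String) : String :=
  PySem.Str.replace (PySem.Str.replace s " " "%20") "\n" "%0A"

-- block.splitlines(keepends=True), called by both A and B; ported by hand (PySem has no
-- keepends variant); exact on the Dom charset, whose only line breaks are '\n', '\r', '\r\n'
def slkAux : List Char → List Char → List String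
  | [], acc => if acc = [] then [] else [String.ofList acc.reverse]
  | '\r' :: '\n' :: rest, acc => String.ofList (acc.reverse ++ ['\r', '\n']) :: slkAux rest []
  | '\r' :: rest, acc => String.ofList (acc.reverse ++ ['\r']) :: slkAux rest []
  | '\n' :: rest, acc => String.ofList (acc.reverse ++ ['\n']) :: slkAux rest []
  | c :: rest, acc => slkAux rest (c :: acc)

def splitlinesKeep (s : String) : List String := slkAux s.toList []

-- ===== PORT A =====

-- the inner `while len(enc(piece)) > encoded_limit and step > 10: step -= 10` loop
def shrink (e : Int) (seg : List Char) (step : Nat) : Nat :=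
  if h : e < (PySem.Chars.len (urlEncode (String.ofList (PySem.List.slice seg none (some (step : Int))))).toList : Int) ∧ 10 < step
  then shrink e seg (step - 10) else step
termination_by step
decreasing_by omega

-- shrink never reaches 0 (cited by hardSplit's decreasing_by)
theorem shrink_pos (e : Int) (seg : List Char) (step : Nat) (h : 1 ≤ step) :
    1 ≤ shrink e seg step := by
  fun_induction shrink e seg step with
  | case1 _ hc ih => exact ih (by omega)
  | case2 => omega

-- the `while seg:` hard-split loop of A; seg as char list
def hardSplit (e : Int) (seg : List Char) : List String :=
  if hs : seg = [] then [] else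
    let step := shrink e seg (min 1000 seg.length)
    String.ofList (PySem.Chars.rstrip (PySem.List.slice seg none (some (step : Int)))) ::
      hardSplit e (PySem.List.slice seg (some (step : Int)) none)
termination_by seg.length
decreasing_by
  rw [PySem.List.slice_from_natCast]
  have h1 : 1 ≤ shrink e seg (min 1000 seg.length) :=
    shrink_pos e seg _ (by have := List.length_pos_iff.mpr hs; omega)
  have h2 : 0 < seg.length := List.length_pos_iff.mpr hs
  simp only [List.length_drop]; omega

-- `for ln in lines:` loop body of A, state = (chunks, small)
def lineStepA (p e : Int) (st : List String × String) (ln : String) : List String × String :=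
  let cand2 := st.2 ++ ln
  if ((PySem.Str.len cand2 : Int) > p || (PySem.Str.len (urlEncode cand2) : Int) > e) then
    let st' := if st.2 ≠ "" then (st.1 ++ [PySem.Str.rstrip st.2], "") else st
    if ((PySem.Str.len ln : Int) > p || (PySem.Str.len (urlEncode ln) : Int) > e) then
      (st'.1 ++ hardSplit e ln.toList, st'.2)
    else (st'.1, ln)
  else (st.1, cand2)

-- `for block in blocks:` loop body of A, state = (chunks, current)
def blockStepA (p e : Int) (st : List String × String) (block : String) : List String × String :=
  let candidate := st.2 ++ block
  if ((PySem.Str.len candidate : Int) > p || (PySem.Str.len (urlEncode candidate) : Int) > e) then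
    let st' := if st.2 ≠ "" then (st.1 ++ [PySem.Str.rstrip st.2], "") else st
    if ((PySem.Str.len block : Int) > p || (PySem.Str.len (urlEncode block) : Int) > e) then
      let st2 := (splitlinesKeep block).foldl (lineStepA p e) (st'.1, "")
      ((if st2.2 ≠ "" then st2.1 ++ [PySem.Str.rstrip st2.2] else st2.1), st'.2)
    else (st'.1, block)
  else (st.1, candidate)

def split_blocks_for_limits_py (blocks : List String) (plain_limit : Int) (encoded_limit : Int) : List String :=
  let st := blocks.foldl (blockStepA plain_limit encoded_limit) ([], "")
  if st.2 ≠ "" then st.1 ++ [PySem.Str.rstrip st.2] else st.1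

-- ===== PORT B =====

-- per-char encoded cost: `3 if ch == " " or ch == "\n" else 1`
def costB (c : Char) : Int := if c = ' ' || c = '\n' then 3 else 1

-- measure(s) = (len(s), len(s) + 2*(s.count(" ") + s.count("\n")))
def measureB (s : String) : Int × Int :=
  (PySem.Str.len s,
   PySem.Str.len s + 2 * (((PySem.Str.count s " " : Nat) : Int) + ((PySem.Str.count s "\n" : Nat) : Int)))

-- fits(n, en)
def fitsB (p e n en : Int) : Bool := n ≤ p && en ≤ e

-- emit(parts, n): flush the joined parts, rstripped, if the chunk is non-empty
def emitB (out parts : List String) (n : Int) : List String :=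
  if n ≠ 0 then out ++ [PySem.Str.rstrip (PySem.Str.join "" parts)] else out

-- `pre=[0]; for ch in ln: pre.append(pre[-1] + cost)`
def preList (ln : List Char) : List Int :=
  ln.foldl (fun pre ch => pre ++ [PySem.List.pyGetD pre (-1) 0 + costB ch]) [0]

-- `while pre[i+step]-pre[i] > encoded_limit and step > 10: step -= 10`
def shrinkB (e : Int) (pre : List Int) (i step : Nat) : Nat :=
  if h : e < PySem.List.pyGetD pre ((i + step : Nat) : Int) 0 - PySem.List.pyGetD pre (i : Int) 0 ∧ 10 < step
  then shrinkB e pre i (step - 10) else step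
termination_by step
decreasing_by omega

theorem shrinkB_pos (e : Int) (pre : List Int) (i step : Nat) (h : 1 ≤ step) :
    1 ≤ shrinkB e pre i step := by
  fun_induction shrinkB e pre i step with
  | case1 _ hc ih => exact ih (by omega)
  | case2 => omega

-- the `while i < total:` loop of hard_split
def hardSplitGo (e : Int) (ln : List Char) (pre : List Int) (i : Nat) : List String :=
  if h : i < ln.length then
    let step := shrinkB e pre i (min 1000 (ln.length - i))
    String.ofList (PySem.Chars.rstrip (PySem.List.slice ln (some (i : Int)) (some ((i + step : Nat) : Int)))) ::
      hardSplitGo e ln pre (i + step)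
  else []
termination_by ln.length - i
decreasing_by
  have h1 : 1 ≤ shrinkB e pre i (min 1000 (ln.length - i)) := shrinkB_pos e pre i _ (by omega)
  omega

def hardSplitB (e : Int) (ln : List Char) : List String :=
  hardSplitGo e ln (preList ln) 0

-- body of the greedy loops of B, state = (out, parts, n, en)
def lineStepB (p e : Int) (st : List String × List String × Int × Int) (ln : String) :
    List String × List String × Int × Int :=
  let m := measureB ln
  if !fitsB p e (st.2.2.1 + m.1) (st.2.2.2 + m.2) then
    let out' := emitB st.1 st.2.1 st.2.2.1
    if !fitsB p e m.1 m.2 then (out' ++ hardSplitB e ln.toList, [], 0, 0)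
    else (out', [ln], m.1, m.2)
  else (st.1, st.2.1 ++ [ln], st.2.2.1 + m.1, st.2.2.2 + m.2)

-- pack_lines(block): line-level greedy pass over splitlines(keepends=True)
def packLinesB (p e : Int) (out : List String) (block : String) : List String :=
  let st := (splitlinesKeep block).foldl (lineStepB p e) (out, [], 0, 0)
  emitB st.1 st.2.1 st.2.2.1

def blockStepB (p e : Int) (st : List String × List String × Int × Int) (block : String) :
    List String × List String × Int × Int :=
  let m := measureB block
  if !fitsB p e (st.2.2.1 + m.1) (st.2.2.2 + m.2) then
    let out' := emitB st.1 st.2.1 st.2.2.1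
    if !fitsB p e m.1 m.2 then (packLinesB p e out' block, [], 0, 0)
    else (out', [block], m.1, m.2)
  else (st.1, st.2.1 ++ [block], st.2.2.1 + m.1, st.2.2.2 + m.2)

def split_blocks_for_limits_py_alt (blocks : List String) (plain_limit : Int) (encoded_limit : Int) : List String :=
  let st := blocks.foldl (blockStepB plain_limit encoded_limit) ([], [], 0, 0)
  emitB st.1 st.2.1 st.2.2.1

-- ===== PRECONDITION & SPEC =====
def Spec_split_blocks_for_limits_py (blocks : List String) (plain_limit : Int) (encoded_limit : Int) (out : List String) : Prop := out = split_blocks_for_limits_py_alt blocks plain_limit encoded_limit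
instance (blocks : List String) (plain_limit : Int) (encoded_limit : Int) (out : List String) : Decidable (Spec_split_blocks_for_limits_py blocks plain_limit encoded_limit out) := by unfold Spec_split_blocks_for_limits_py; infer_instance

-- ===== CLAIM (what is proved, stated in full; the proofs are below) =====
def Claim_equal_split_blocks_for_limits_py : Prop := ∀ (blocks : List String) (plain_limit : Int) (encoded_limit : Int), Dom_split_blocks_for_limits_py blocks plain_limit encoded_limit → Spec_split_blocks_for_limits_py blocks plain_limit encoded_limit (split_blocks_for_limits_py blocks plain_limit encoded_limit)

-- ===== LEMMAS AND PROOFS =====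

-- total encoded cost of a char list (proof-side abstraction)
def sumCost (cs : List Char) : Int := (cs.map costB).sum

theorem sumCost_append (a b : List Char) : sumCost (a ++ b) = sumCost a + sumCost b := by
  simp [sumCost]

-- replace with singleton pattern is a flatMap

theorem repl_go (a : Char) (new : List Char) (fuel : Nat) :
    ∀ (l acc : List Char), l.length ≤ fuel →
    PySem.Chars.replace.go [a] new fuel l acc
      = acc.reverse ++ l.flatMap (fun c => if c = a then new else [c]) := by
  induction fuel with
  | zero => intro l acc h; rw [PySem.Chars.replace.go.eq_def]
            have : l = [] := by cases l <;> simp_all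
            subst this; simp
  | succ fuel ih =>
      intro l acc h
      rw [PySem.Chars.replace.go.eq_def]
      cases l with
      | nil => simp
      | cons c t =>
          by_cases hc : c = a
          · subst hc
            simp only [List.isPrefixOf, BEq.rfl, Bool.true_and, List.isPrefixOf_nil_left, if_pos]
            rw [ih _ _ (by simpa using Nat.le_of_succ_le_succ h)]
            simp
          · have : ([a].isPrefixOf (c :: t)) = false := by
              simp [List.isPrefixOf, hc]; intro hh; exact absurd hh.symm hc
            simp only [this, Bool.false_eq_true, if_neg, not_false_eq_true]
            rw [ih _ _ (by simpa using Nat.le_of_succ_le_succ h)]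
            simp [hc]

theorem repl_singleton (a : Char) (new s : List Char) :
    PySem.Chars.replace s [a] new = s.flatMap (fun c => if c = a then new else [c]) := by
  rw [PySem.Chars.replace]
  simp only [List.isEmpty_cons, if_neg, Bool.false_eq_true, not_false_eq_true]
  exact repl_go a new s.length s [] le_rfl

theorem enc_len (s : String) : PySem.Str.len (urlEncode s) = sumCost s.toList := by
  rw [PySem.Str.len_eq, urlEncode, PySem.Str.toList_replace, PySem.Str.toList_replace]
  have h1 : (" " : String).toList = [' '] := rfl
  have h2 : ("%20" : String).toList = ['%','2','0'] := rfl
  have h3 : ("\n" : String).toList = ['\n'] := rfl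
  have h4 : ("%0A" : String).toList = ['%','0','A'] := rfl
  rw [h1, h2, h3, h4, repl_singleton, repl_singleton]
  generalize s.toList = cs
  induction cs with
  | nil => simp [sumCost]
  | cons c t ih =>
      simp only [List.flatMap_cons, List.flatMap_append, List.length_append, sumCost,
        List.map_cons, List.sum_cons] at *
      by_cases hsp : c = ' ' <;> by_cases hnl : c = '\n' <;>
        simp_all [costB] <;> push_cast <;> omega

-- count.go with singleton pattern

theorem count_go (a : Char) (fuel : Nat) :
    ∀ (l : List Char) (acc : Nat), l.length ≤ fuel →
    PySem.Chars.count.go [a] fuel l acc = acc + l.count a := by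
  induction fuel with
  | zero => intro l acc h
            rw [PySem.Chars.count.go.eq_def]
            have : l = [] := by cases l <;> simp_all
            subst this; simp
  | succ fuel ih =>
      intro l acc h
      rw [PySem.Chars.count.go.eq_def]
      cases l with
      | nil => simp
      | cons c t =>
          by_cases hc : c = a
          · subst hc
            simp only [List.isPrefixOf, BEq.rfl, Bool.true_and, List.isPrefixOf_nil_left, if_pos]
            rw [ih _ _ (by simpa using Nat.le_of_succ_le_succ h)]
            simp [List.count_cons]; omega
          · have : ([a].isPrefixOf (c :: t)) = false := by
              simp [List.isPrefixOf, hc]; intro hh; exact absurd hh.symm hc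
            simp only [this, Bool.false_eq_true, if_neg, not_false_eq_true]
            rw [ih _ _ (by simpa using Nat.le_of_succ_le_succ h)]
            simp [List.count_cons, hc]

theorem count_singleton (a : Char) (s : List Char) :
    PySem.Chars.count s [a] = s.count a := by
  rw [PySem.Chars.count]
  simp only [List.isEmpty_cons, if_neg, Bool.false_eq_true, not_false_eq_true]
  simpa using count_go a s.length s 0 le_rfl

theorem sumCost_eq_counts (cs : List Char) :
    sumCost cs = (cs.length : Int) + 2 * ((cs.count ' ' : Int) + (cs.count '\n' : Int)) := by
  induction cs with
  | nil => simp [sumCost]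
  | cons c t ih =>
      simp only [sumCost, List.map_cons, List.sum_cons, List.count_cons, List.length_cons] at *
      by_cases h1 : c = ' ' <;> by_cases h2 : c = '\n' <;> simp_all [costB] <;> push_cast <;> ring

-- ===== hard split =====

def presFrom (v : Int) : List Char → List Int
  | [] => []
  | c :: t => (v + costB c) :: presFrom (v + costB c) t

theorem pyGetD_append_last (l : List Int) (x : Int) :
    PySem.List.pyGetD (l ++ [x]) (-1) 0 = x := by
  simp [PySem.List.pyGetD, PySem.List.pyGet?, PySem.List.pyIdx?]

theorem foldl_pre (cs : List Char) : ∀ (pre : List Int) (v : Int),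
    cs.foldl (fun pre ch => pre ++ [PySem.List.pyGetD pre (-1) 0 + costB ch]) (pre ++ [v])
      = pre ++ [v] ++ presFrom v cs := by
  induction cs with
  | nil => simp [presFrom]
  | cons c t ih =>
      intro pre v
      simp only [List.foldl_cons, pyGetD_append_last, presFrom]
      rw [show pre ++ [v] ++ [v + costB c] = (pre ++ [v]) ++ [v + costB c] from by simp]
      rw [ih (pre ++ [v]) (v + costB c)]
      simp

theorem preList_eq (ln : List Char) : preList ln = 0 :: presFrom 0 ln := by
  have := foldl_pre ln [] 0
  simpa [preList] using this

theorem presFrom_getD (cs : List Char) : ∀ (v : Int) (k : Nat), k < cs.length →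
    (presFrom v cs).getD k 0 = v + sumCost (cs.take (k + 1)) := by
  induction cs with
  | nil => intro v k h; simp at h
  | cons c t ih =>
      intro v k h
      cases k with
      | zero => simp [presFrom, sumCost]
      | succ k =>
          simp only [presFrom, List.getD_cons_succ, List.take_succ_cons]
          rw [ih _ k (by simpa using Nat.lt_of_succ_lt_succ h)]
          simp only [sumCost, List.map_cons, List.sum_cons]
          ring

theorem preList_getD (ln : List Char) (k : Nat) (h : k ≤ ln.length) :
    PySem.List.pyGetD (preList ln) (k : Int) 0 = sumCost (ln.take k) := by
  rw [PySem.List.pyGetD_natCast, preList_eq]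
  cases k with
  | zero => simp [sumCost]
  | succ k =>
      simp only [List.getD_cons_succ]
      rw [presFrom_getD ln 0 k (by omega)]
      simp

theorem shrinkB_le (e : Int) (pre : List Int) (i step : Nat) : shrinkB e pre i step ≤ step := by
  fun_induction shrinkB e pre i step with
  | case1 _ hc ih => omega
  | case2 => omega

theorem cond_bridge (e : Int) (ln : List Char) (i step : Nat) (h : i + step ≤ ln.length) :
    (e < (PySem.Chars.len (urlEncode (String.ofList (PySem.List.slice (ln.drop i) none (some (step : Int))))).toList : Int))
      ↔ (e < PySem.List.pyGetD (preList ln) ((i + step : Nat) : Int) 0 - PySem.List.pyGetD (preList ln) (i : Int) 0) := by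
  rw [PySem.List.slice_to _ (by positivity)]
  rw [preList_getD ln (i + step) h, preList_getD ln i (by omega)]
  have hlen : (PySem.Chars.len (urlEncode (String.ofList (List.take (step : Int).toNat (ln.drop i)))).toList : Int)
      = sumCost ((ln.drop i).take step) := by
    have h2 := enc_len (String.ofList (List.take (step : Int).toNat (ln.drop i)))
    rw [PySem.Str.len_eq, String.toList_ofList] at h2
    rw [PySem.Chars.len, h2]
    simp
  rw [hlen]
  rw [List.take_add, sumCost_append]
  omega

theorem shrink_eq (e : Int) (ln : List Char) (i : Nat) :
    ∀ step, i + step ≤ ln.length → shrink e (ln.drop i) step = shrinkB e (preList ln) i step := by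
  intro step
  induction step using Nat.strong_induction_on with
  | _ step ih =>
      intro h
      have hc := cond_bridge e ln i step h
      rw [shrink, shrinkB]
      by_cases hb : (e < PySem.List.pyGetD (preList ln) ((i + step : Nat) : Int) 0 - PySem.List.pyGetD (preList ln) (i : Int) 0 ∧ 10 < step)
      · rw [dif_pos ⟨hc.mpr hb.1, hb.2⟩, dif_pos hb]
        exact ih (step - 10) (by omega) (by omega)
      · rw [dif_neg (fun hh => hb ⟨hc.mp hh.1, hh.2⟩), dif_neg hb]

theorem hardSplitGo_eq (e : Int) (ln : List Char) (d : Nat) :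
    ∀ i, i ≤ ln.length → ln.length - i ≤ d →
    hardSplit e (ln.drop i) = hardSplitGo e ln (preList ln) i := by
  induction d with
  | zero =>
      intro i h1 h2
      rw [hardSplit, hardSplitGo]
      rw [dif_pos (by simp [List.drop_eq_nil_iff]; omega), dif_neg (by omega)]
  | succ d ih =>
      intro i h1 h2
      rw [hardSplit, hardSplitGo]
      by_cases hlt : i < ln.length
      · have hne : ln.drop i ≠ [] := by simp [List.drop_eq_nil_iff]; omega
        rw [dif_neg hne, dif_pos hlt]
        have hlen : (ln.drop i).length = ln.length - i := List.length_drop ..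
        have hs : shrink e (ln.drop i) (min 1000 (ln.drop i).length)
            = shrinkB e (preList ln) i (min 1000 (ln.length - i)) := by
          rw [hlen]; exact shrink_eq e ln i _ (by omega)
        have hstep1 : 1 ≤ shrinkB e (preList ln) i (min 1000 (ln.length - i)) :=
          shrinkB_pos _ _ _ _ (by omega)
        have hstep2 : shrinkB e (preList ln) i (min 1000 (ln.length - i)) ≤ ln.length - i :=
          le_trans (shrinkB_le _ _ _ _) (by omega)
        simp only [hs]
        generalize hst : shrinkB e (preList ln) i (min 1000 (ln.length - i)) = step at *
        congr 1
        · rw [PySem.List.slice_to _ (by positivity), PySem.List.slice_natCast]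
          simp
        · rw [PySem.List.slice_from_natCast, List.drop_drop]
          exact ih (i + step) (by omega) (by omega)
      · rw [dif_pos (by simp [List.drop_eq_nil_iff]; omega), dif_neg hlt]

theorem hardSplit_eq (e : Int) (ln : List Char) : hardSplit e ln = hardSplitB e ln := by
  have := hardSplitGo_eq e ln ln.length 0 (by omega) (by omega)
  simpa [hardSplitB] using this

-- ===== state machine =====

def SRel (stA : List String × String) (stB : List String × List String × Int × Int) : Prop :=
  stB.1 = stA.1 ∧ stA.2.toList = (stB.2.1.map String.toList).flatten ∧
  stB.2.2.1 = PySem.Str.len stA.2 ∧ stB.2.2.2 = sumCost stA.2.toList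

-- measure computes (length, total encoded cost)

theorem measure_spec (s : String) : measureB s = (PySem.Str.len s, sumCost s.toList) := by
  have h1 : (" " : String).toList = [' '] := rfl
  have h2 : ("\n" : String).toList = ['\n'] := rfl
  simp only [measureB, PySem.Str.count, h1, h2, count_singleton, PySem.Str.len_eq,
    sumCost_eq_counts, Prod.mk.injEq]

theorem join_nil (l : List (List Char)) : PySem.Chars.join [] l = l.flatten := by
  rw [PySem.Chars.join]
  induction l with
  | nil => simp [List.intercalate]
  | cons a t ih =>
      cases t with
      | nil => simp [List.intercalate]
      | cons b t2 =>
          simp only [List.intercalate] at *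
          simp only [List.intersperse_cons₂, List.flatten_cons] at *
          simp [ih]

theorem SRel_flush {stA : List String × String} {stB : List String × List String × Int × Int}
    (h : SRel stA stB) :
    (if stA.2 ≠ "" then stA.1 ++ [PySem.Str.rstrip stA.2] else stA.1) = emitB stB.1 stB.2.1 stB.2.2.1 := by
  obtain ⟨h1, h2, h3, h4⟩ := h
  rw [emitB, h1, h3, PySem.Str.len_eq]
  by_cases hc : stA.2 = ""
  · have : stA.2.toList = [] := String.toList_eq_nil_iff.mpr hc
    rw [if_neg (by simp [hc]), if_neg (by simp [this])]
  · have hl : stA.2.toList ≠ [] := fun hh => hc (String.toList_eq_nil_iff.mp hh)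
    have hlen0 : ((stA.2.toList.length : Int) ≠ 0) := by
      simpa using fun hh => hl (List.length_eq_zero_iff.mp hh)
    rw [if_pos hc, if_pos hlen0]
    have : PySem.Str.rstrip (PySem.Str.join "" stB.2.1) = PySem.Str.rstrip stA.2 := by
      rw [PySem.Str.rstrip, PySem.Str.rstrip]
      congr 1
      rw [PySem.Str.toList_join]
      have : ("" : String).toList = [] := rfl
      rw [this, join_nil, h2]
    rw [this]

-- the two overflow tests agree

theorem cond_bool (p e : Int) (cur item : String) (n en : Int)
    (hn : n = PySem.Str.len cur) (hen : en = sumCost cur.toList) :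
    ((PySem.Str.len (cur ++ item) : Int) > p || (PySem.Str.len (urlEncode (cur ++ item)) : Int) > e)
      = !fitsB p e (n + (measureB item).1) (en + (measureB item).2) := by
  rw [measure_spec, enc_len, PySem.Str.len_append]
  have : (cur ++ item).toList = cur.toList ++ item.toList := String.toList_append
  rw [this, sumCost_append, fitsB, hn, hen]
  by_cases c1 : ((cur.length : Int) + (item.length : Int) ≤ p) <;>
    by_cases c2 : sumCost cur.toList + sumCost item.toList ≤ e <;>
      simp [c1, c2] <;> omega

theorem cond_bool_one (p e : Int) (item : String) :
    ((PySem.Str.len item : Int) > p || (PySem.Str.len (urlEncode item) : Int) > e)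
      = !fitsB p e (measureB item).1 (measureB item).2 := by
  rw [measure_spec, enc_len, fitsB]
  by_cases c1 : ((item.length : Int) ≤ p) <;>
    by_cases c2 : sumCost item.toList ≤ e <;>
      simp [c1, c2] <;> omega

theorem str_empty_iff (cur : String) : cur = "" ↔ cur.toList = [] :=
  ⟨fun h => String.toList_eq_nil_iff.mpr h, fun h => String.toList_eq_nil_iff.mp h⟩

theorem lineStep_rel (p e : Int) {stA : List String × String}
    {stB : List String × List String × Int × Int} (h : SRel stA stB) (ln : String) :
    SRel (lineStepA p e stA ln) (lineStepB p e stB ln) := by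
  obtain ⟨chunks, cur⟩ := stA
  obtain ⟨out, parts, n, en⟩ := stB
  obtain ⟨h1, h2, h3, h4⟩ := h
  simp only at h1 h2 h3 h4
  have hflush : (if cur ≠ "" then chunks ++ [PySem.Str.rstrip cur] else chunks) = emitB out parts n :=
    SRel_flush (stA := (chunks, cur)) (stB := (out, parts, n, en)) ⟨h1, h2, h3, h4⟩
  rw [lineStepA, lineStepB]
  simp only
  rw [show ((PySem.Str.len (cur ++ ln) : Int) > p || (PySem.Str.len (urlEncode (cur ++ ln)) : Int) > e)
      = !fitsB p e (n + (measureB ln).1) (en + (measureB ln).2) from cond_bool p e cur ln n en h3 h4]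
  rw [cond_bool_one p e ln]
  by_cases hov : (!fitsB p e (n + (measureB ln).1) (en + (measureB ln).2)) = true
  · rw [if_pos hov, if_pos hov]
    by_cases hone : (!fitsB p e (measureB ln).1 (measureB ln).2) = true
    · rw [if_pos hone, if_pos hone]
      refine ⟨?_, ?_, ?_, ?_⟩
      · simp only [hardSplit_eq]
        by_cases hcur : cur = "" <;> simp only [hcur, ne_eq, not_true_eq_false, if_neg,
          not_false_eq_true, if_pos, ← hflush] <;> simp [hcur]
      · by_cases hcur : cur = "" <;> simp [hcur, str_empty_iff]
      · by_cases hcur : cur = "" <;> simp [hcur, PySem.Str.len_eq, str_empty_iff]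
      · by_cases hcur : cur = "" <;> simp [hcur, sumCost, str_empty_iff]
    · rw [if_neg hone, if_neg hone]
      exact ⟨by rw [← hflush]; by_cases hcur : cur = "" <;> simp [hcur],
        by simp, by rw [measure_spec], by rw [measure_spec]⟩
  · rw [if_neg hov, if_neg hov]
    refine ⟨h1, ?_, ?_, ?_⟩
    · rw [String.toList_append, h2]; simp
    · rw [measure_spec, PySem.Str.len_append, h3]
    · rw [measure_spec, String.toList_append, sumCost_append, h4]

theorem foldl_rel (p e : Int)
    (fA : Int → Int → (List String × String) → String → (List String × String))
    (fB : Int → Int → (List String × List String × Int × Int) → String → (List String × List String × Int × Int))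
    (hstep : ∀ {stA : List String × String} {stB : List String × List String × Int × Int}, SRel stA stB → ∀ x, SRel (fA p e stA x) (fB p e stB x))
    (l : List String) {stA : List String × String} {stB : List String × List String × Int × Int} (h : SRel stA stB) :
    SRel (l.foldl (fA p e) stA) (l.foldl (fB p e) stB) := by
  induction l generalizing stA stB with
  | nil => exact h
  | cons x l ih => exact ih (hstep h x)

theorem blockStep_rel (p e : Int) {stA : List String × String}
    {stB : List String × List String × Int × Int} (h : SRel stA stB) (b : String) :
    SRel (blockStepA p e stA b) (blockStepB p e stB b) := by
  obtain ⟨chunks, cur⟩ := stA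
  obtain ⟨out, parts, n, en⟩ := stB
  obtain ⟨h1, h2, h3, h4⟩ := h
  simp only at h1 h2 h3 h4
  have hflush : (if cur ≠ "" then chunks ++ [PySem.Str.rstrip cur] else chunks) = emitB out parts n :=
    SRel_flush (stA := (chunks, cur)) (stB := (out, parts, n, en)) ⟨h1, h2, h3, h4⟩
  rw [blockStepA, blockStepB]
  simp only
  rw [show ((PySem.Str.len (cur ++ b) : Int) > p || (PySem.Str.len (urlEncode (cur ++ b)) : Int) > e)
      = !fitsB p e (n + (measureB b).1) (en + (measureB b).2) from cond_bool p e cur b n en h3 h4]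
  rw [cond_bool_one p e b]
  by_cases hov : (!fitsB p e (n + (measureB b).1) (en + (measureB b).2)) = true
  · rw [if_pos hov, if_pos hov]
    by_cases hone : (!fitsB p e (measureB b).1 (measureB b).2) = true
    · rw [if_pos hone, if_pos hone]
      have hst' : (if cur ≠ "" then (chunks ++ [PySem.Str.rstrip cur], "") else (chunks, cur)).1
          = emitB out parts n := by
        rw [← hflush]; by_cases hcur : cur = "" <;> simp [hcur]
      have hstart : SRel ((if cur ≠ "" then (chunks ++ [PySem.Str.rstrip cur], "") else (chunks, cur)).1, "")
          (emitB out parts n, [], 0, 0) := by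
        have hemp : ("" : String).toList = [] := rfl
        exact ⟨hst'.symm, by simp [hemp], by simp [PySem.Str.len_eq, hemp], by simp [sumCost, hemp]⟩
      have hin := foldl_rel p e lineStepA lineStepB (fun hh x => lineStep_rel p e hh x)
        (splitlinesKeep b) hstart
      obtain ⟨g1, g2, g3, g4⟩ := hin
      refine ⟨?_, ?_, ?_, ?_⟩
      · rw [packLinesB]
        rw [← SRel_flush ⟨g1, g2, g3, g4⟩]
      · by_cases hcur : cur = "" <;> simp [hcur, str_empty_iff]
      · by_cases hcur : cur = "" <;> simp [hcur, PySem.Str.len_eq, str_empty_iff]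
      · by_cases hcur : cur = "" <;> simp [hcur, sumCost, str_empty_iff]
    · rw [if_neg hone, if_neg hone]
      exact ⟨by rw [← hflush]; by_cases hcur : cur = "" <;> simp [hcur],
        by simp, by rw [measure_spec], by rw [measure_spec]⟩
  · rw [if_neg hov, if_neg hov]
    refine ⟨h1, ?_, ?_, ?_⟩
    · rw [String.toList_append, h2]; simp
    · rw [measure_spec, PySem.Str.len_append, h3]
    · rw [measure_spec, String.toList_append, sumCost_append, h4]

-- ===== VERDICT (by name: the statement is the Claim_ definition above) =====
theorem split_blocks_for_limits_py_spec : Claim_equal_split_blocks_for_limits_py := by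
  intro blocks p e _
  show _ = _
  have hemp : ("" : String).toList = [] := rfl
  have h0 : SRel ([], "") ([], [], 0, 0) :=
    ⟨rfl, by simp [hemp], by simp [PySem.Str.len_eq, hemp], by simp [sumCost, hemp]⟩
  have h := foldl_rel p e blockStepA blockStepB (fun hh x => blockStep_rel p e hh x) blocks h0
  obtain ⟨g1, g2, g3, g4⟩ := h
  rw [split_blocks_for_limits_py, split_blocks_for_limits_py_alt]
  exact SRel_flush ⟨g1, g2, g3, g4⟩
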